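-- pv_equiv track=rewrite | github.com/kky990826/algorithm-daily-commit | 2025-05-03/modify_numbers.py | solution
-- ===== SOURCE A (Python) =====
-- def solution(n, control):
--     control_list = list(control)
--     for i in control_list:
--         if i == "w":
--            n = n +1
--         elif i == "s":
--            n = n -1
--         elif i == "a":
--            n = n - 10
--         elif i == "d":
--            n = n + 10
--     return n
-- ===== SOURCE B (Python) =====
-- DELTA = {"w": 1, "s": -1, "a": -10, "d": 10}
--
-- def solution(n, control):
--     # Divide and conquer: the effect of the control string on n is the
--     # sequential application of per-letter deltas; since each step is a
--     # translation of the integer line, applying the left half first and then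
--     # the right half equals applying the whole string.
--     if len(control) == 0:
--         return n
--     if len(control) == 1:
--         return n + DELTA.get(control, 0)
--     m = len(control) // 2
--     return solution(solution(n, control[:m]), control[m:])
-- ===== Notes on version B (the rewrite author's own statement) =====
-- stated objective: alternative
-- what changed: Replaces A's iterative left-to-right loop that mutates n per character with a loop-free divide-and-conquer recursion: the string is split in half, each half is solved recursively, and single letters are resolved through a delta table; correctness rests on the fact that each step is a translation, so composing the halves' translations equals the sequential walk.
import Mathlib
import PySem

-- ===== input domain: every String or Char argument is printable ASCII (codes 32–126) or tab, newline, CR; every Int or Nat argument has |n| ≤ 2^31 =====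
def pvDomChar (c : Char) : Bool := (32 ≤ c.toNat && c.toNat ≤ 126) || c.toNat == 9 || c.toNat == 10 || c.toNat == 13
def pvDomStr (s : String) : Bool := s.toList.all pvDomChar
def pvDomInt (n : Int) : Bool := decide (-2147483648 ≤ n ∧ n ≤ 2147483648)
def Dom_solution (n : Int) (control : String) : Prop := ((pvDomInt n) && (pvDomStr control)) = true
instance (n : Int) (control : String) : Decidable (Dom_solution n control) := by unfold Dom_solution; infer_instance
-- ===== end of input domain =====

-- B replaces A's iterative per-character loop by a loop-free divide-and-conquer
-- recursion over string halves with a delta table (objective: alternative).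

-- ===== PORT A =====
def solution (n : Int) (control : String) : Int :=
  control.toList.foldl (fun n i =>
    if i == 'w' then n + 1
    else if i == 's' then n - 1
    else if i == 'a' then n - 10
    else if i == 'd' then n + 10
    else n) n

-- ===== PORT B =====
-- DELTA = {"w": 1, "s": -1, "a": -10, "d": 10}; keys are the one-char strings,
-- ported as Char since Source B only looks up a length-1 string.
def pvDelta : List (Char × Int) := [('w', 1), ('s', -1), ('a', -10), ('d', 10)]

-- dict.get(k, dflt): first-match lookup in the association list
def pvDictGet (d : List (Char × Int)) (k : Char) (dflt : Int) : Int :=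
  match d with
  | [] => dflt
  | (k', v) :: rest => if k == k' then v else pvDictGet rest k dflt

-- Source B's recursion; control[:m] / control[m:] with 0 ≤ m ≤ len are exactly take/drop.
-- The fuel argument (initially the length) is only a structural-termination device;
-- each recursive call strictly shrinks the list, so fuel = length always suffices.
def solveDC (fuel : Nat) (n : Int) (l : List Char) : Int :=
  match fuel with
  | 0 => n
  | fuel + 1 =>
    if l.length = 0 then n
    else if l.length = 1 then n + pvDictGet pvDelta l.headI 0
    else
      let m := l.length / 2
      solveDC fuel (solveDC fuel n (l.take m)) (l.drop m)

def solution_alt (n : Int) (control : String) : Int :=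
  solveDC control.toList.length n control.toList

-- ===== PRECONDITION & SPEC =====
def Spec_solution (n : Int) (control : String) (out : Int) : Prop := out = solution_alt n control
instance (n : Int) (control : String) (out : Int) : Decidable (Spec_solution n control out) := by unfold Spec_solution; infer_instance

-- ===== CLAIM (what is proved, stated in full; the proofs are below) =====
def Claim_equal_solution : Prop := ∀ (n : Int) (control : String), Dom_solution n control → Spec_solution n control (solution n control)

-- ===== LEMMAS AND PROOFS =====
def pvStep (n : Int) (i : Char) : Int :=
  if i == 'w' then n + 1
  else if i == 's' then n - 1
  else if i == 'a' then n - 10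
  else if i == 'd' then n + 10
  else n

theorem pvDictGet_delta (c : Char) : pvDictGet pvDelta c 0 = pvStep 0 c := by
  simp only [pvDictGet, pvDelta, pvStep]
  split_ifs <;> norm_num

theorem pvStep_add (n : Int) (c : Char) : pvStep n c = n + pvStep 0 c := by
  simp only [pvStep]
  split_ifs <;> ring

theorem solveDC_foldl (fuel : Nat) (n : Int) (l : List Char) (h : l.length ≤ fuel) :
    solveDC fuel n l = l.foldl pvStep n := by
  induction fuel generalizing n l with
  | zero =>
    have hnil : l = [] := List.length_eq_zero_iff.mp (Nat.le_zero.mp h)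
    simp [hnil, solveDC]
  | succ fuel ih =>
    match l, h with
    | [], _ => simp [solveDC]
    | [c], _ => simp [solveDC, List.headI, pvDictGet_delta, Eq.symm (pvStep_add n c)]
    | a :: b :: rest, h =>
      have h2 : ¬ (a :: b :: rest).length = 0 := by simp
      have h3 : ¬ (a :: b :: rest).length = 1 := by simp
      rw [solveDC, if_neg h2, if_neg h3]
      have hlen : (a :: b :: rest).length = rest.length + 2 := by simp
      have ht : ((a :: b :: rest).take ((a :: b :: rest).length / 2)).length ≤ fuel := by
        simp only [List.length_take, hlen]
        simp only [List.length_cons] at h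
        omega
      have hdr : ((a :: b :: rest).drop ((a :: b :: rest).length / 2)).length ≤ fuel := by
        simp only [List.length_drop, hlen]
        simp only [List.length_cons] at h
        omega
      show solveDC fuel (solveDC fuel n ((a :: b :: rest).take ((a :: b :: rest).length / 2)))
            ((a :: b :: rest).drop ((a :: b :: rest).length / 2))
          = List.foldl pvStep n (a :: b :: rest)
      rw [ih _ _ ht, ih _ _ hdr, ← List.foldl_append, List.take_append_drop]

-- ===== VERDICT (by name: the statement is the Claim_ definition above) =====
theorem solution_spec : Claim_equal_solution := by
  intro n control _
  unfold Spec_solution solution solution_alt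
  rw [solveDC_foldl _ _ _ (le_refl _)]
  rfl
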